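-- pv_equiv track=rewrite | github.com/pypi-data/pypi-mirror-280 | packages/cae-model/cae_model-0.0.1.tar.gz/cae_model-0.0.1/cae_model/element_types.py | split_facet
-- ===== SOURCE A (Python) =====
-- def split_facet(facet:list[int]) -> list[int]:
--     if len(facet) == 3:
--         return facet
--     if len(facet) < 3:
--         return []
--     tail = facet[2:]
--     tail.append(facet[1])
--     tris = [facet[-1],facet[0],facet[1]]
--     tris.extend(split_facet(tail))
--     return tris
-- ===== SOURCE B (Python) =====
-- def split_facet(facet: list[int]) -> list[int]:
--     # Iterative one-pass version: simulate the recursion with a growing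
--     # buffer and a read head instead of O(n) slicing at every level.
--     n = len(facet)
--     if n < 3:
--         return []
--     buf = list(facet)
--     i = 0
--     out = []
--     while len(buf) - i > 3:
--         a = buf[i]
--         b = buf[i + 1]
--         i += 2
--         out.extend((buf[-1], a, b))
--         buf.append(b)
--     out.extend(buf[i:])
--     return out
-- ===== Notes on version B (the rewrite author's own statement) =====
-- stated objective: faster
-- what changed: Replaced the recursion that rebuilds a sliced-and-extended copy of the facet at every level with a single iterative pass over one growing buffer and a read head, so no per-level O(n) slicing or recursion remains.
import Mathlib
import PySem

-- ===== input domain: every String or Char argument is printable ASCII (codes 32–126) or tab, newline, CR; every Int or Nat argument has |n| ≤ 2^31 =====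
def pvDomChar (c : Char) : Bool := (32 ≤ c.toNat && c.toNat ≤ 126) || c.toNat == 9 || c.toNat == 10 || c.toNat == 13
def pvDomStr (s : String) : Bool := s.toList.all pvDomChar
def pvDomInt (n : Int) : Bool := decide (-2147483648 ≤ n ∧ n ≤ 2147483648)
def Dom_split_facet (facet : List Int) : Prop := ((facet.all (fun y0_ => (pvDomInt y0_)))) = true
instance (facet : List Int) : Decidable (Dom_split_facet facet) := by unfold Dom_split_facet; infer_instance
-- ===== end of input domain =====

-- B replaces A's recursion (which slices and copies the facet at every level) by a single
-- iterative pass over one growing buffer with a read head; same return value, O(n) instead of O(n^2).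

-- ===== PORT A =====
-- literal transliteration of A's recursion; all indices (1, 0, -1) are in range since length > 3
def split_facet (facet : List Int) : List Int :=
  if facet.length = 3 then facet
  else if facet.length < 3 then []
  else
    let tail := PySem.List.slice facet (some 2) none ++ [PySem.List.pyGetD facet 1 0]
    [PySem.List.pyGetD facet (-1) 0, PySem.List.pyGetD facet 0 0, PySem.List.pyGetD facet 1 0]
      ++ split_facet tail
termination_by facet.length
decreasing_by
  have : PySem.List.slice facet (some 2) none = facet.drop 2 := by
    simpa using PySem.List.slice_from (xs := facet) (a := 2) (by norm_num)
  simp [this]; omega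

-- ===== PORT B =====
-- the while-loop of Source B: buf grows at the back, i is the read head, out the accumulator
def splitLoop (buf : List Int) (i : Nat) (out : List Int) : List Int :=
  if buf.length - i > 3 then
    let a := PySem.List.pyGetD buf (i : Int) 0
    let b := PySem.List.pyGetD buf ((i : Int) + 1) 0
    splitLoop (buf ++ [b]) (i + 2) (out ++ [PySem.List.pyGetD buf (-1) 0, a, b])
  else out ++ buf.drop i
termination_by buf.length - i
decreasing_by simp; omega

def split_facet_alt (facet : List Int) : List Int :=
  if facet.length < 3 then [] else splitLoop facet 0 []

-- ===== PRECONDITION & SPEC =====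
def Spec_split_facet (facet : List Int) (out : List Int) : Prop := out = split_facet_alt facet
instance (facet : List Int) (out : List Int) : Decidable (Spec_split_facet facet out) := by unfold Spec_split_facet; infer_instance

-- ===== CLAIM (what is proved, stated in full; the proofs are below) =====
def Claim_equal_split_facet : Prop := ∀ (facet : List Int), Dom_split_facet facet → Spec_split_facet facet (split_facet facet)

-- ===== LEMMAS AND PROOFS =====

theorem splitLoop_eq (n : Nat) : ∀ (buf : List Int) (i : Nat) (out : List Int),
    buf.length - i = n → 3 ≤ n → splitLoop buf i out = out ++ split_facet (buf.drop i) := by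
  induction n using Nat.strong_induction_on with
  | _ n ih =>
    intro buf i out hn h3
    by_cases hgt : buf.length - i > 3
    · -- one loop iteration = one level of A's recursion on the suffix buf.drop i
      have hL : 4 ≤ buf.length - i := hgt
      have hbufne : buf ≠ [] := by intro h; simp [h] at hL
      have hfne : buf.drop i ≠ [] := by
        intro h; have := congrArg List.length h; simp at this; omega
      have hA : split_facet (buf.drop i) =
          [PySem.List.pyGetD (buf.drop i) (-1) 0, PySem.List.pyGetD (buf.drop i) 0 0,
            PySem.List.pyGetD (buf.drop i) 1 0]
            ++ split_facet (PySem.List.slice (buf.drop i) (some 2) none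
                ++ [PySem.List.pyGetD (buf.drop i) 1 0]) := by
        rw [split_facet, if_neg (by simp; omega), if_neg (by simp; omega)]
      rw [splitLoop, if_pos hgt]
      rw [ih (n - 1) (by omega) _ _ _ (by simp; omega) (by omega)]
      rw [hA]
      have hslice : PySem.List.slice (buf.drop i) (some 2) none = buf.drop (i + 2) := by
        have := PySem.List.slice_from (xs := buf.drop i) (a := 2) (by norm_num)
        simpa [List.drop_drop, Nat.add_comm] using this
      have hdropapp : ∀ b : Int, (buf ++ [b]).drop (i + 2) = buf.drop (i + 2) ++ [b] :=
        fun b => List.drop_append_of_le_length (by omega)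
      have e2 : PySem.List.pyGetD buf (i : Int) 0 = PySem.List.pyGetD (buf.drop i) 0 0 := by
        simp [PySem.List.pyGetD_natCast, PySem.List.pyGetD_zero,
          List.getD_eq_getElem?_getD, List.getElem?_drop]
      have e3 : PySem.List.pyGetD buf ((i : Int) + 1) 0 = PySem.List.pyGetD (buf.drop i) 1 0 := by
        have h1 : ((i : Int) + 1) = ((i + 1 : Nat) : Int) := by push_cast; ring
        have h2 : (1 : Int) = ((1 : Nat) : Int) := by norm_num
        rw [h1, h2, PySem.List.pyGetD_natCast, PySem.List.pyGetD_natCast]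
        simp [List.getD_eq_getElem?_getD, List.getElem?_drop]
      have e1 : PySem.List.pyGetD buf (-1) 0 = PySem.List.pyGetD (buf.drop i) (-1) 0 := by
        rw [PySem.List.pyGetD_neg_one buf 0 hbufne, PySem.List.pyGetD_neg_one (buf.drop i) 0 hfne]
        rw [List.getLast_eq_getElem, List.getLast_eq_getElem]
        rw [List.getElem_drop]
        congr 1
        simp; omega
      rw [hdropapp, hslice, e1, e2, e3, List.append_assoc]
    · -- exactly three elements left: both sides return them verbatim
      rw [splitLoop, if_neg hgt, split_facet]
      have hlen : (buf.drop i).length = 3 := by simp; omega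
      rw [if_pos hlen]

theorem split_facet_spec : Claim_equal_split_facet := by
  unfold Claim_equal_split_facet
  intro facet _
  unfold Spec_split_facet split_facet_alt
  by_cases h : facet.length < 3
  · rw [if_pos h, split_facet, if_neg (by omega), if_pos h]
  · rw [if_neg h, splitLoop_eq (facet.length - 0) facet 0 [] rfl (by omega)]
    simp
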